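-- pv_equiv track=rewrite | github.com/lythous/sokhan102 | detection.py | cluster_consecutive_centers
-- ===== SOURCE A (Python) =====
-- def cluster_consecutive_centers(nums):
--     """
--     Groups consecutive integers and returns the integer center of each group.
--     Example:
--
--     nums = [
--     0, 1, 2, 3, 4, 5, 6, 7, 8, 9, 10,
--     52, 53, 54, 55, 56, 57, 58, 59, 60, 61, 62, 63, 64, 65, 66, 67, 68,
--     107, 108, 109, 110, 111, 112, 113, 114, 115, 116, 117, 118, 119, 120,
--     121, 122, 123, 124, 125, 126, 127,
--     132,
--     170, 171, 172, 173, 174, 175, 176, 177, 178, 179, 180, 181, 182, 183, 184, 185, 186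
--     ]
--
--     result = [5, 60, 117, 132, 178]
--     """
--     if not nums:
--         return []
--
--     nums = sorted(nums)
--     clusters = []
--     start = prev = nums[0]
--
--     for n in nums[1:]:
--         if n == prev + 1:
--             prev = n
--         else:
--             clusters.append((start, prev))
--             start = prev = n
--
--     clusters.append((start, prev))
--
--     # Compute integer centers
--     centers = [(a + b) // 2 for a, b in clusters]
--     return centers
-- ===== SOURCE B (Python) =====
-- def cluster_consecutive_centers(nums):
--     if not nums:
--         return []
--     s = sorted(nums)
--     firsts = [s[0]] + [y for x, y in zip(s, s[1:]) if y != x + 1]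
--     lasts = [x for x, y in zip(s, s[1:]) if y != x + 1] + [s[-1]]
--     return [(a + b) // 2 for a, b in zip(firsts, lasts)]
-- ===== Notes on version B (the rewrite author's own statement) =====
-- stated objective: idiomatic
-- what changed: Replaces A's start/prev state machine with a declarative pipeline: zip the sorted list with its shift to find run boundaries, build the lists of run-starts and run-ends by comprehensions, and zip them into centers.
import Mathlib
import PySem

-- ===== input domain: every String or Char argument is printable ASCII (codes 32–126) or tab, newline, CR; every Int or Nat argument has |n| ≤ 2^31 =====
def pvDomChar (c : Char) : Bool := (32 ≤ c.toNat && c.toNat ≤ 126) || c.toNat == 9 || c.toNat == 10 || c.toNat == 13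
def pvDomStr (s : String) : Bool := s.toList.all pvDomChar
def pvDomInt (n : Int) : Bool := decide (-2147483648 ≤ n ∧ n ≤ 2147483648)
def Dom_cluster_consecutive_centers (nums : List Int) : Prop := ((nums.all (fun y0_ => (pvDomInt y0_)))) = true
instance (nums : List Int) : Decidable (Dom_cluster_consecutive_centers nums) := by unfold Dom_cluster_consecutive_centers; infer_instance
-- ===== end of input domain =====

-- B replaces A's start/prev state machine by a declarative zip-with-shift boundary scan (idiomatic, same cost).

-- ===== PORT A =====
-- Literal port of A: empty guard, sort, fold over nums[1:] carrying (start, prev, clusters),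
-- append final cluster, map centers with Python floor division.
def cluster_consecutive_centers (nums : List Int) : List Int :=
  if nums = [] then []
  else
    let s := PySem.List.sorted nums (fun x => x) false
    match s with
    | [] => []
    | h :: _ =>
      let rest := PySem.List.slice s (some 1) none   -- nums[1:]
      let r := rest.foldl (fun (acc : Int × Int × List (Int × Int)) n =>
          if n = acc.2.1 + 1 then (acc.1, n, acc.2.2)
          else (n, n, acc.2.2 ++ [(acc.1, acc.2.1)])) (h, h, [])
      (r.2.2 ++ [(r.1, r.2.1)]).map (fun p => PySem.Int.floordiv (p.1 + p.2) 2)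

-- ===== PORT B =====
-- Literal port of Source B: zip s with s[1:], firsts = s[0] :: breaks' right ends,
-- lasts = breaks' left ends ++ [s[-1]], centers = zip firsts lasts mapped through (a+b)//2.
def cluster_consecutive_centers_alt (nums : List Int) : List Int :=
  if nums = [] then []
  else
    let s := PySem.List.sorted nums (fun x => x) false
    match s with
    | [] => []
    | h :: t =>
      let pairs := List.zip (h :: t) t          -- zip(s, s[1:]); s[1:] = t since s = h :: t
      let firsts := h :: pairs.filterMap (fun p => if p.2 ≠ p.1 + 1 then some p.2 else none)
      let lasts := pairs.filterMap (fun p => if p.2 ≠ p.1 + 1 then some p.1 else none)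
                    ++ [t.getLastD h]           -- s[-1]: last element of s = h :: t
      (List.zip firsts lasts).map (fun p => PySem.Int.floordiv (p.1 + p.2) 2)

-- ===== PRECONDITION & SPEC =====
def Spec_cluster_consecutive_centers (nums : List Int) (out : List Int) : Prop := out = cluster_consecutive_centers_alt nums
instance (nums : List Int) (out : List Int) : Decidable (Spec_cluster_consecutive_centers nums out) := by unfold Spec_cluster_consecutive_centers; infer_instance

-- ===== CLAIM (what is proved, stated in full; the proofs are below) =====
def Claim_equal_cluster_consecutive_centers : Prop := ∀ (nums : List Int), Dom_cluster_consecutive_centers nums → Spec_cluster_consecutive_centers nums (cluster_consecutive_centers nums)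

-- ===== LEMMAS AND PROOFS =====

-- Common characterisation: maximal runs of consecutive integers as (start, last) pairs.
def pvChop : Int → Int → List Int → List (Int × Int)
  | st, pv, [] => [(st, pv)]
  | st, pv, n :: t => if n = pv + 1 then pvChop st n t else (st, pv) :: pvChop n n t

-- A's fold produces exactly pvChop's clusters.
theorem pvA_fold (t : List Int) (st pv : Int) (cl : List (Int × Int)) :
    (let r := t.foldl (fun (acc : Int × Int × List (Int × Int)) n =>
        if n = acc.2.1 + 1 then (acc.1, n, acc.2.2)
        else (n, n, acc.2.2 ++ [(acc.1, acc.2.1)])) (st, pv, cl);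
      r.2.2 ++ [(r.1, r.2.1)]) = cl ++ pvChop st pv t := by
  induction t generalizing st pv cl with
  | nil => simp [pvChop]
  | cons n t ih =>
    simp only [List.foldl_cons, pvChop]
    by_cases hn : n = pv + 1
    · simp [hn, ih]
    · simp [hn, ih]

-- B's zip-of-boundaries produces exactly pvChop's clusters.
theorem pvB_zip (t : List Int) (st pv : Int) :
    List.zip (st :: (List.zip (pv :: t) t).filterMap (fun p => if p.2 ≠ p.1 + 1 then some p.2 else none))
      ((List.zip (pv :: t) t).filterMap (fun p => if p.2 ≠ p.1 + 1 then some p.1 else none)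
        ++ [t.getLastD pv]) = pvChop st pv t := by
  induction t generalizing st pv with
  | nil => simp [pvChop]
  | cons n t ih =>
    simp only [List.zip_cons_cons, List.filterMap_cons, pvChop]
    by_cases hn : n = pv + 1
    · simp only [hn, ne_eq, not_true_eq_false, List.getLastD_cons]
      simpa [hn] using ih st n
    · simp only [ne_eq, hn, not_false_eq_true, if_pos, List.getLastD_cons, List.cons_append,
        List.zip_cons_cons]
      exact congrArg _ (ih n n)

-- ===== VERDICT (by name: the statement is the Claim_ definition above) =====
theorem cluster_consecutive_centers_spec : Claim_equal_cluster_consecutive_centers := by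
  intro nums _
  unfold Spec_cluster_consecutive_centers cluster_consecutive_centers cluster_consecutive_centers_alt
  by_cases h : nums = []
  · simp [h]
  · simp only [h]
    cases hs : PySem.List.sorted nums (fun x => x) false with
    | nil => simp
    | cons a t =>
      simp only [PySem.List.slice_from_one, List.tail_cons]
      rw [pvA_fold, pvB_zip]
      simp
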